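-- pv_equiv track=rewrite | github.com/turtle-cyber/PS02 | AIML/data_prep/extract_url_features.py | count_special_chars
-- ===== SOURCE A (Python) =====
-- from typing import Dict, List, Set
--
-- def count_special_chars(url: str) -> Dict[str, int]:
--     """Count special characters in URL"""
--     return {
--         'dot_count': url.count('.'),
--         'dash_count': url.count('-'),
--         'underscore_count': url.count('_'),
--         'at_count': url.count('@'),
--         'slash_count': url.count('/'),
--         'question_count': url.count('?'),
--         'equal_count': url.count('='),
--         'ampersand_count': url.count('&'),
--         'digit_count': sum(1 for c in url if c.isdigit()),
--     }
-- ===== SOURCE B (Python) =====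
-- def count_special_chars(url: str):
--     """Count special characters in URL (single pass instead of nine scans)"""
--     dot = dash = und = at = sl = q = eq = amp = dig = 0
--     for c in url:
--         if c == '.':
--             dot += 1
--         elif c == '-':
--             dash += 1
--         elif c == '_':
--             und += 1
--         elif c == '@':
--             at += 1
--         elif c == '/':
--             sl += 1
--         elif c == '?':
--             q += 1
--         elif c == '=':
--             eq += 1
--         elif c == '&':
--             amp += 1
--         elif c.isdigit():
--             dig += 1
--     return {
--         'dot_count': dot,
--         'dash_count': dash,
--         'underscore_count': und,
--         'at_count': at,
--         'slash_count': sl,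
--         'question_count': q,
--         'equal_count': eq,
--         'ampersand_count': amp,
--         'digit_count': dig,
--     }
-- ===== Notes on version B (the rewrite author's own statement) =====
-- stated objective: alternative
-- what changed: B makes a single pass over the string with nine accumulators (one if/elif chain per character) instead of A's nine separate scans (eight str.count calls plus a generator sum).
import Mathlib
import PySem

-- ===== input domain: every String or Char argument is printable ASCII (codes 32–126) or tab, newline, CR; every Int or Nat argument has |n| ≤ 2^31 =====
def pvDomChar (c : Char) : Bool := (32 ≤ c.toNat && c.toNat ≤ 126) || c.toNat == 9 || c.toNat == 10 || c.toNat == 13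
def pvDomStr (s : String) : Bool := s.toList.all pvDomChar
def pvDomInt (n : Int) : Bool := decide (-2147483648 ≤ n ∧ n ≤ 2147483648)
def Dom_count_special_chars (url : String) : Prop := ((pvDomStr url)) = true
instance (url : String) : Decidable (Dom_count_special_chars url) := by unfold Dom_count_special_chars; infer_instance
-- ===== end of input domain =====

-- B replaces A's nine separate scans of the URL by one single pass with nine accumulators (objective: alternative).


-- ===== PORT A =====
-- Literal port: eight url.count(ch) scans plus sum(1 for c in url if c.isdigit()).
def count_special_chars (url : String) : List (String × Int) :=
  [ ("dot_count", (PySem.Str.count url "." : Int)),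
    ("dash_count", (PySem.Str.count url "-" : Int)),
    ("underscore_count", (PySem.Str.count url "_" : Int)),
    ("at_count", (PySem.Str.count url "@" : Int)),
    ("slash_count", (PySem.Str.count url "/" : Int)),
    ("question_count", (PySem.Str.count url "?" : Int)),
    ("equal_count", (PySem.Str.count url "=" : Int)),
    ("ampersand_count", (PySem.Str.count url "&" : Int)),
    ("digit_count", ((url.toList.filter (fun c => PySem.Chars.isdigit c)).map (fun _ => (1 : Int))).sum) ]

-- ===== PORT B =====
-- B's nine accumulators, one per counted category.
structure CSCounts where
  dotC : Int
  dashC : Int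
  undC : Int
  atC : Int
  slC : Int
  qC : Int
  eqC : Int
  ampC : Int
  digC : Int
deriving Repr, DecidableEq

-- One iteration of B's for-loop: the if/elif chain on a single character.
def csStep (s : CSCounts) (c : Char) : CSCounts :=
  if c == '.' then { s with dotC := s.dotC + 1 }
  else if c == '-' then { s with dashC := s.dashC + 1 }
  else if c == '_' then { s with undC := s.undC + 1 }
  else if c == '@' then { s with atC := s.atC + 1 }
  else if c == '/' then { s with slC := s.slC + 1 }
  else if c == '?' then { s with qC := s.qC + 1 }
  else if c == '=' then { s with eqC := s.eqC + 1 }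
  else if c == '&' then { s with ampC := s.ampC + 1 }
  else if PySem.Chars.isdigit c then { s with digC := s.digC + 1 }
  else s

def count_special_chars_alt (url : String) : List (String × Int) :=
  let s := url.toList.foldl csStep ⟨0, 0, 0, 0, 0, 0, 0, 0, 0⟩
  [ ("dot_count", s.dotC),
    ("dash_count", s.dashC),
    ("underscore_count", s.undC),
    ("at_count", s.atC),
    ("slash_count", s.slC),
    ("question_count", s.qC),
    ("equal_count", s.eqC),
    ("ampersand_count", s.ampC),
    ("digit_count", s.digC) ]

-- ===== PRECONDITION & SPEC =====
def Spec_count_special_chars (url : String) (out : List (String × Int)) : Prop := out = count_special_chars_alt url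
instance (url : String) (out : List (String × Int)) : Decidable (Spec_count_special_chars url out) := by unfold Spec_count_special_chars; infer_instance

-- ===== CLAIM (what is proved, stated in full; the proofs are below) =====
def Claim_equal_count_special_chars : Prop := ∀ (url : String), Dom_count_special_chars url → Spec_count_special_chars url (count_special_chars url)

-- ===== LEMMAS AND PROOFS =====

-- PySem.Chars.count with a single-character needle is List.count.
theorem csc_go_singleton (c : Char) (l : List Char) (fuel acc : Nat)
    (h : l.length ≤ fuel) :
    PySem.Chars.count.go [c] fuel l acc = acc + l.count c := by
  induction l generalizing fuel acc with
  | nil => cases fuel <;> simp [PySem.Chars.count.go]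
  | cons hd t ih =>
      cases fuel with
      | zero => simp at h
      | succ f =>
          simp only [List.length_cons, Nat.succ_le_succ_iff] at h
          rw [PySem.Chars.count.go]
          by_cases hc : hd = c
          · subst hc
            simp [List.isPrefixOf, ih _ _ h, List.count_cons]
            omega
          · have hp : (List.isPrefixOf [c] (hd :: t)) = false := by
              simp [List.isPrefixOf]
              exact fun h' => hc h'.symm
            simp [hp, ih _ _ h, List.count_cons, hc]

theorem csc_count_singleton (s : List Char) (c : Char) :
    PySem.Chars.count s [c] = s.count c := by
  rw [PySem.Chars.count]
  simp [csc_go_singleton c s s.length 0 (le_refl _)]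

-- Loop invariant for B's single pass.
theorem csc_loop (l : List Char) (s : CSCounts) :
    l.foldl csStep s =
      ⟨ s.dotC + l.count '.', s.dashC + l.count '-', s.undC + l.count '_',
        s.atC + l.count '@', s.slC + l.count '/', s.qC + l.count '?',
        s.eqC + l.count '=', s.ampC + l.count '&',
        s.digC + (l.countP (fun c => PySem.Chars.isdigit c) : Int) ⟩ := by
  induction l generalizing s with
  | nil => simp
  | cons c t ih =>
      simp only [List.foldl_cons, csStep]
      split_ifs with h1 h2 h3 h4 h5 h6 h7 h8 h9 <;>
        (rw [ih]
         simp only [beq_iff_eq] at *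
         try subst_vars
         simp [CSCounts.mk.injEq, *,
           (by decide : PySem.Chars.isdigit '.' = false),
           (by decide : PySem.Chars.isdigit '-' = false),
           (by decide : PySem.Chars.isdigit '_' = false),
           (by decide : PySem.Chars.isdigit '@' = false),
           (by decide : PySem.Chars.isdigit '/' = false),
           (by decide : PySem.Chars.isdigit '?' = false),
           (by decide : PySem.Chars.isdigit '=' = false),
           (by decide : PySem.Chars.isdigit '&' = false)]
         try omega)

-- ===== VERDICT (by name: the statement is the Claim_ definition above) =====
theorem count_special_chars_spec : Claim_equal_count_special_chars := by
  intro url _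
  unfold Spec_count_special_chars count_special_chars count_special_chars_alt
  rw [csc_loop]
  simp only [PySem.Str.count_eq]
  simp [csc_count_singleton, List.countP_eq_length_filter]
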